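-- pv_equiv track=rewrite | github.com/JeevanandanRamasamy/RU-Algorithmic-Advising | backend/services/sections_service.py | get_required_gap
-- ===== SOURCE A (Python) =====
-- def get_required_gap(c1: str, c2: str) -> int:
--     """
--     Get the required gap between two campuses.
--     :param c1: Campus 1
--     :param c2: Campus 2
--     :return: Required gap in minutes
--     """
--     groups = [
--         {"BUSCH", "LIVINGSTON"},
--         {"COLLEGE AVENUE", "COOK/DOUGLASS", "DOWNTOWN"},
--     ]
--     for group in groups:
--         if c1 in group and c2 in group:
--             return 30
--     return 40
-- ===== SOURCE B (Python) =====
-- # Same-group relation precomputed as a flat set of ordered pairs: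
-- # one membership test on (c1, c2), no groups and no per-campus classification.
-- _SAME_GROUP_PAIRS = frozenset({
--     ("BUSCH", "BUSCH"), ("BUSCH", "LIVINGSTON"),
--     ("LIVINGSTON", "BUSCH"), ("LIVINGSTON", "LIVINGSTON"),
--     ("COLLEGE AVENUE", "COLLEGE AVENUE"), ("COLLEGE AVENUE", "COOK/DOUGLASS"),
--     ("COLLEGE AVENUE", "DOWNTOWN"),
--     ("COOK/DOUGLASS", "COLLEGE AVENUE"), ("COOK/DOUGLASS", "COOK/DOUGLASS"),
--     ("COOK/DOUGLASS", "DOWNTOWN"),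
--     ("DOWNTOWN", "COLLEGE AVENUE"), ("DOWNTOWN", "COOK/DOUGLASS"),
--     ("DOWNTOWN", "DOWNTOWN"),
-- })
--
--
-- def get_required_gap(c1: str, c2: str) -> int:
--     """
--     Get the required gap between two campuses.
--     :param c1: Campus 1
--     :param c2: Campus 2
--     :return: Required gap in minutes
--     """
--     return 30 if (c1, c2) in _SAME_GROUP_PAIRS else 40
-- ===== Notes on version B (the rewrite author's own statement) =====
-- stated objective: alternative
-- what changed: B discards the group structure entirely and precomputes the same-group relation itself as a flat set of the 13 ordered campus pairs, deciding the gap with a single membership test on the pair (c1, c2) instead of scanning groups for joint membership.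
import Mathlib
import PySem

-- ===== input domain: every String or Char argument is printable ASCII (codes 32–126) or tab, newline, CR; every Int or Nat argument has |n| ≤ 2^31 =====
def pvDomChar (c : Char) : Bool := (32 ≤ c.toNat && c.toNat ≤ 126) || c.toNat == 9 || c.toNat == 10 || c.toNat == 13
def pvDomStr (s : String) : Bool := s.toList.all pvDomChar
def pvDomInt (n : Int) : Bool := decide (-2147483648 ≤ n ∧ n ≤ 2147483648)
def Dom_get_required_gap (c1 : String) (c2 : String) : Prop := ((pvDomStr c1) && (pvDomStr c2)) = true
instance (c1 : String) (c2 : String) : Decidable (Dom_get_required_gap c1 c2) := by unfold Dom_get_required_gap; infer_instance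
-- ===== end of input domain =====

-- B replaces A's scan over group sets with a precomputed set of the 13 same-group
-- ordered pairs and a single membership test on (c1, c2) (alternative; same values everywhere).

-- ===== PORT A =====
-- the literal list of the two set literals from A
def pvGroups : List (PySem.Set String) :=
  [PySem.Set.ofList ["BUSCH", "LIVINGSTON"],
   PySem.Set.ofList ["COLLEGE AVENUE", "COOK/DOUGLASS", "DOWNTOWN"]]

-- 'for group in groups: if c1 in group and c2 in group: return 30' then 'return 40'
def pvGapLoop (c1 : String) (c2 : String) : List (PySem.Set String) → Int
  | [] => 40
  | g :: gs => if PySem.Set.contains g c1 && PySem.Set.contains g c2 then 30 else pvGapLoop c1 c2 gs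

def get_required_gap (c1 : String) (c2 : String) : Int :=
  pvGapLoop c1 c2 pvGroups

-- ===== PORT B =====
-- the module-level _SAME_GROUP_PAIRS set from Source B
def pvSameGroupPairs : PySem.Set (String × String) :=
  PySem.Set.ofList
    [("BUSCH", "BUSCH"), ("BUSCH", "LIVINGSTON"),
     ("LIVINGSTON", "BUSCH"), ("LIVINGSTON", "LIVINGSTON"),
     ("COLLEGE AVENUE", "COLLEGE AVENUE"), ("COLLEGE AVENUE", "COOK/DOUGLASS"),
     ("COLLEGE AVENUE", "DOWNTOWN"),
     ("COOK/DOUGLASS", "COLLEGE AVENUE"), ("COOK/DOUGLASS", "COOK/DOUGLASS"),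
     ("COOK/DOUGLASS", "DOWNTOWN"),
     ("DOWNTOWN", "COLLEGE AVENUE"), ("DOWNTOWN", "COOK/DOUGLASS"),
     ("DOWNTOWN", "DOWNTOWN")]

-- '30 if (c1, c2) in _SAME_GROUP_PAIRS else 40'
def get_required_gap_alt (c1 : String) (c2 : String) : Int :=
  if PySem.Set.contains pvSameGroupPairs (c1, c2) then 30 else 40

-- ===== PRECONDITION & SPEC =====
def Spec_get_required_gap (c1 : String) (c2 : String) (out : Int) : Prop := out = get_required_gap_alt c1 c2
instance (c1 : String) (c2 : String) (out : Int) : Decidable (Spec_get_required_gap c1 c2 out) := by unfold Spec_get_required_gap; infer_instance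

-- ===== CLAIM (what is proved, stated in full; the proofs are below) =====
def Claim_equal_get_required_gap : Prop := ∀ (c1 : String) (c2 : String), Dom_get_required_gap c1 c2 → Spec_get_required_gap c1 c2 (get_required_gap c1 c2)

-- ===== LEMMAS AND PROOFS =====

-- A's loop, characterised: joint membership in the first group, else the second, else 40
lemma pvLoop_eq (c1 c2 : String) : get_required_gap c1 c2 =
    if (c1 = "BUSCH" ∨ c1 = "LIVINGSTON") ∧ (c2 = "BUSCH" ∨ c2 = "LIVINGSTON") then 30
    else if (c1 = "COLLEGE AVENUE" ∨ c1 = "COOK/DOUGLASS" ∨ c1 = "DOWNTOWN") ∧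
            (c2 = "COLLEGE AVENUE" ∨ c2 = "COOK/DOUGLASS" ∨ c2 = "DOWNTOWN") then 30
    else 40 := by
  have hg : pvGroups = [["BUSCH", "LIVINGSTON"], ["COLLEGE AVENUE", "COOK/DOUGLASS", "DOWNTOWN"]] := by
    decide
  unfold get_required_gap
  rw [hg]
  simp only [pvGapLoop, PySem.Set.contains, List.contains_eq_mem, List.mem_cons,
    List.not_mem_nil, or_false, Bool.and_eq_true, decide_eq_true_eq]

-- B's pair set, characterised: membership implies joint membership in one of A's two groups
lemma pvPairs_mem_mp (c1 c2 : String)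
    (hc : PySem.Set.contains pvSameGroupPairs (c1, c2) = true) :
    ((c1 = "BUSCH" ∨ c1 = "LIVINGSTON") ∧ (c2 = "BUSCH" ∨ c2 = "LIVINGSTON")) ∨
    ((c1 = "COLLEGE AVENUE" ∨ c1 = "COOK/DOUGLASS" ∨ c1 = "DOWNTOWN") ∧
     (c2 = "COLLEGE AVENUE" ∨ c2 = "COOK/DOUGLASS" ∨ c2 = "DOWNTOWN")) := by
  have h : (c1, c2) ∈
      ([("BUSCH", "BUSCH"), ("BUSCH", "LIVINGSTON"),
        ("LIVINGSTON", "BUSCH"), ("LIVINGSTON", "LIVINGSTON"),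
        ("COLLEGE AVENUE", "COLLEGE AVENUE"), ("COLLEGE AVENUE", "COOK/DOUGLASS"),
        ("COLLEGE AVENUE", "DOWNTOWN"),
        ("COOK/DOUGLASS", "COLLEGE AVENUE"), ("COOK/DOUGLASS", "COOK/DOUGLASS"),
        ("COOK/DOUGLASS", "DOWNTOWN"),
        ("DOWNTOWN", "COLLEGE AVENUE"), ("DOWNTOWN", "COOK/DOUGLASS"),
        ("DOWNTOWN", "DOWNTOWN")] : List (String × String)) :=
    (PySem.Set.mem_ofList _ _).mp
      (by rwa [show PySem.Set.contains pvSameGroupPairs (c1, c2)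
                  = List.contains pvSameGroupPairs (c1, c2) from rfl,
               List.contains_eq_mem, decide_eq_true_eq] at hc)
  simp only [List.mem_cons, List.not_mem_nil, or_false, Prod.mk.injEq] at h
  rcases h with ⟨rfl, rfl⟩ | ⟨rfl, rfl⟩ | ⟨rfl, rfl⟩ | ⟨rfl, rfl⟩ | ⟨rfl, rfl⟩ | ⟨rfl, rfl⟩ |
    ⟨rfl, rfl⟩ | ⟨rfl, rfl⟩ | ⟨rfl, rfl⟩ | ⟨rfl, rfl⟩ | ⟨rfl, rfl⟩ | ⟨rfl, rfl⟩ | ⟨rfl, rfl⟩ <;>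
    decide

-- ===== VERDICT (by name: the statement is the Claim_ definition above) =====
theorem get_required_gap_spec : Claim_equal_get_required_gap := by
  intro c1 c2 _
  unfold Spec_get_required_gap get_required_gap_alt
  rw [pvLoop_eq]
  by_cases h1 : (c1 = "BUSCH" ∨ c1 = "LIVINGSTON") ∧ (c2 = "BUSCH" ∨ c2 = "LIVINGSTON")
  · rcases h1 with ⟨rfl | rfl, rfl | rfl⟩ <;> decide
  · by_cases h2 : (c1 = "COLLEGE AVENUE" ∨ c1 = "COOK/DOUGLASS" ∨ c1 = "DOWNTOWN") ∧
        (c2 = "COLLEGE AVENUE" ∨ c2 = "COOK/DOUGLASS" ∨ c2 = "DOWNTOWN")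
    · rcases h2 with ⟨rfl | rfl | rfl, rfl | rfl | rfl⟩ <;> decide
    · have hc : ¬ PySem.Set.contains pvSameGroupPairs (c1, c2) = true := fun hc =>
        (pvPairs_mem_mp c1 c2 hc).elim h1 h2
      rw [if_neg h1, if_neg h2, if_neg hc]
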